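-- pv_equiv track=rewrite | github.com/Cayman-Wang/mahjong-ai | src/mahjong_ai/core/engine.py | _pick_closest_to_player
-- ===== SOURCE A (Python) =====
-- def _pick_closest_to_player(center_pid: int, candidates: list[int]) -> int | None:
--     """Pick the closest candidate in clockwise order from `center_pid`."""
--     if not candidates:
--         return None
--     for i in range(1, 5):
--         pid = (center_pid + i) % 4
--         if pid in candidates:
--             return pid
--     return candidates[0]
-- ===== SOURCE B (Python) =====
-- def _pick_closest_to_player(center_pid: int, candidates: list[int]) -> int | None:
--     """Pick the closest candidate in clockwise order from `center_pid`."""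
--     if not candidates:
--         return None
--     valid = [c for c in candidates if 0 <= c <= 3]
--     if not valid:
--         return candidates[0]
--     return min(valid, key=lambda c: (c - center_pid - 1) % 4)
-- ===== Notes on version B (the rewrite author's own statement) =====
-- stated objective: alternative
-- what changed: Instead of scanning the four clockwise seat positions and testing each for membership in candidates, B scans the candidates once, keeps those in the valid seat range 0..3, and returns the one minimising the clockwise-distance key (c - center_pid - 1) % 4 (falling back to candidates[0] when none is a valid seat).
import Mathlib
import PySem

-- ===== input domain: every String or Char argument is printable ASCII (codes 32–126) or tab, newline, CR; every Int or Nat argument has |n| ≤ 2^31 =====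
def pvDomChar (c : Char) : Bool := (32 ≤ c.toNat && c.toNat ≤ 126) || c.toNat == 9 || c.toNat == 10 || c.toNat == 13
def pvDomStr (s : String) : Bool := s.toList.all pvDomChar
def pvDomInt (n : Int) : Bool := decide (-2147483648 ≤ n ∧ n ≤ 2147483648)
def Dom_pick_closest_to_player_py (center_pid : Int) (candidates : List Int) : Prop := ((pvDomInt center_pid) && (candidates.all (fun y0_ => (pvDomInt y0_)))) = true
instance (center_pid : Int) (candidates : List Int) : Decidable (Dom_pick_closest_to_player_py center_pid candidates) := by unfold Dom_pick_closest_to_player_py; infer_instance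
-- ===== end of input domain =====

-- B replaces A's scan over the four clockwise seat positions (each with a membership test)
-- by a single scan over the candidates, minimising a clockwise-distance key; alternative decomposition.


-- ===== PORT A =====
-- the 'for i in range(1, 5)' loop: return pid on the first hit, else candidates[0]
def pickA_loop (center_pid : Int) (candidates : List Int) : List Int → Option Int
  | [] => PySem.List.pyGet? candidates 0
  | i :: rest =>
    let pid := PySem.Int.mod (center_pid + i) 4
    if pid ∈ candidates then some pid else pickA_loop center_pid candidates rest

def pick_closest_to_player_py (center_pid : Int) (candidates : List Int) : Option Int :=
  if candidates = [] then none
  else pickA_loop center_pid candidates (PySem.List.pyRange 1 5 1)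

-- ===== PORT B =====
def pick_closest_to_player_py_alt (center_pid : Int) (candidates : List Int) : Option Int :=
  if candidates = [] then none
  else
    let valid := candidates.filter (fun c => decide (0 ≤ c ∧ c ≤ 3))
    match PySem.List.min? valid (fun c => PySem.Int.mod (c - center_pid - 1) 4) with
    | some m => some m
    | none => PySem.List.pyGet? candidates 0

-- ===== PRECONDITION & SPEC =====
def Spec_pick_closest_to_player_py (center_pid : Int) (candidates : List Int) (out : Option Int) : Prop := out = pick_closest_to_player_py_alt center_pid candidates
instance (center_pid : Int) (candidates : List Int) (out : Option Int) : Decidable (Spec_pick_closest_to_player_py center_pid candidates out) := by unfold Spec_pick_closest_to_player_py; infer_instance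

-- ===== CLAIM (what is proved, stated in full; the proofs are below) =====
def Claim_equal_pick_closest_to_player_py : Prop := ∀ (center_pid : Int) (candidates : List Int), Dom_pick_closest_to_player_py center_pid candidates → Spec_pick_closest_to_player_py center_pid candidates (pick_closest_to_player_py center_pid candidates)

-- ===== LEMMAS AND PROOFS =====

theorem pyRange_1_5 : PySem.List.pyRange 1 5 1 = [1, 2, 3, 4] := by decide

-- the key of the pid A tests at step i (1 ≤ i ≤ 4) is i - 1
theorem key_of_pid (center i : Int) (h1 : 1 ≤ i) (h4 : i ≤ 4) :
    PySem.Int.mod (PySem.Int.mod (center + i) 4 - center - 1) 4 = i - 1 := by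
  rw [PySem.Int.mod_eq_emod_of_pos (by norm_num), PySem.Int.mod_eq_emod_of_pos (by norm_num)]
  omega

theorem pid_bounds (center i : Int) :
    0 ≤ PySem.Int.mod (center + i) 4 ∧ PySem.Int.mod (center + i) 4 ≤ 3 := by
  rw [PySem.Int.mod_eq_emod_of_pos (by norm_num)]
  omega

-- a valid candidate m with key i-1 is exactly the pid tested at step i
theorem pid_of_key (center m i : Int) (h0 : 0 ≤ m) (h3 : m ≤ 3)
    (hk : PySem.Int.mod (m - center - 1) 4 = i - 1) :
    PySem.Int.mod (center + i) 4 = m := by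
  rw [PySem.Int.mod_eq_emod_of_pos (by norm_num)] at hk ⊢
  omega

-- if no candidate lies in 0..3, every one of A's four tests fails
theorem loopA_all_invalid (center : Int) (cs : List Int)
    (h : ∀ c ∈ cs, ¬ (0 ≤ c ∧ c ≤ 3)) (is : List Int) :
    pickA_loop center cs is = PySem.List.pyGet? cs 0 := by
  induction is with
  | nil => rfl
  | cons i rest ih =>
    simp only [pickA_loop]
    rw [if_neg, ih]
    intro hmem
    exact h _ hmem (pid_bounds center i)

theorem loopA_min (center : Int) (cs : List Int) (m : Int)
    (hm : m ∈ cs) (h0 : 0 ≤ m) (h3 : m ≤ 3)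
    (hmin : ∀ y ∈ cs, 0 ≤ y → y ≤ 3 →
      PySem.Int.mod (m - center - 1) 4 ≤ PySem.Int.mod (y - center - 1) 4) :
    pickA_loop center cs [1, 2, 3, 4] = some m := by
  have hkb : 0 ≤ PySem.Int.mod (m - center - 1) 4 ∧ PySem.Int.mod (m - center - 1) 4 ≤ 3 := by
    rw [PySem.Int.mod_eq_emod_of_pos (by norm_num)]; omega
  -- the pid tested at step (key m + 1) is m itself
  have hhit : ∀ i : Int, PySem.Int.mod (m - center - 1) 4 = i - 1 →
      PySem.Int.mod (center + i) 4 ∈ cs ∧ PySem.Int.mod (center + i) 4 = m := by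
    intro i hi
    have := pid_of_key center m i h0 h3 hi
    exact ⟨this ▸ hm, this⟩
  -- any test at an earlier step j fails
  have hmiss : ∀ j : Int, 1 ≤ j → j ≤ 4 → j - 1 < PySem.Int.mod (m - center - 1) 4 →
      PySem.Int.mod (center + j) 4 ∉ cs := by
    intro j hj1 hj4 hjlt hmem
    have hb := pid_bounds center j
    have := hmin _ hmem hb.1 hb.2
    rw [key_of_pid center j hj1 hj4] at this
    omega
  have h01 : PySem.Int.mod (m - center - 1) 4 = 0 ∨ PySem.Int.mod (m - center - 1) 4 = 1 ∨
      PySem.Int.mod (m - center - 1) 4 = 2 ∨ PySem.Int.mod (m - center - 1) 4 = 3 := by omega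
  rcases h01 with h | h | h | h
  · obtain ⟨hmem, heq⟩ := hhit 1 (by omega)
    simp only [pickA_loop]
    rw [if_pos hmem, heq]
  · obtain ⟨hmem, heq⟩ := hhit 2 (by omega)
    simp only [pickA_loop]
    rw [if_neg (hmiss 1 (by norm_num) (by norm_num) (by omega)), if_pos hmem, heq]
  · obtain ⟨hmem, heq⟩ := hhit 3 (by omega)
    simp only [pickA_loop]
    rw [if_neg (hmiss 1 (by norm_num) (by norm_num) (by omega)),
        if_neg (hmiss 2 (by norm_num) (by norm_num) (by omega)), if_pos hmem, heq]
  · obtain ⟨hmem, heq⟩ := hhit 4 (by omega)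
    simp only [pickA_loop]
    rw [if_neg (hmiss 1 (by norm_num) (by norm_num) (by omega)),
        if_neg (hmiss 2 (by norm_num) (by norm_num) (by omega)),
        if_neg (hmiss 3 (by norm_num) (by norm_num) (by omega)), if_pos hmem, heq]

-- ===== VERDICT (by name: the statement is the Claim_ definition above) =====
theorem pick_closest_to_player_py_spec : Claim_equal_pick_closest_to_player_py := by
  intro center cs _
  unfold Spec_pick_closest_to_player_py pick_closest_to_player_py pick_closest_to_player_py_alt
  by_cases hnil : cs = []
  · simp [hnil]
  · rw [if_neg hnil, if_neg hnil, pyRange_1_5]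
    set valid := cs.filter (fun c => decide (0 ≤ c ∧ c ≤ 3)) with hv
    show pickA_loop center cs [1, 2, 3, 4] =
      match PySem.List.min? valid (fun c => PySem.Int.mod (c - center - 1) 4) with
      | some m => some m
      | none => PySem.List.pyGet? cs 0
    rcases hmq : PySem.List.min? valid (fun c => PySem.Int.mod (c - center - 1) 4) with _ | m
    · -- no valid candidate
      have hvnil : valid = [] := (PySem.List.min?_eq_none_iff _ _).mp hmq
      have hno : ∀ c ∈ cs, ¬ (0 ≤ c ∧ c ≤ 3) := by
        intro c hc hcv
        have : c ∈ valid := by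
          rw [hv]; exact List.mem_filter.mpr ⟨hc, by simpa using hcv⟩
        rw [hvnil] at this
        exact absurd this (List.not_mem_nil)
      rw [loopA_all_invalid center cs hno]
    · have hmv : m ∈ valid := PySem.List.min?_mem hmq
      have hmcs : m ∈ cs := List.mem_filter.mp (hv ▸ hmv) |>.1
      have hmr : 0 ≤ m ∧ m ≤ 3 := by
        have := (List.mem_filter.mp (hv ▸ hmv)).2
        simpa using this
      have hmin : ∀ y ∈ cs, 0 ≤ y → y ≤ 3 →
          PySem.Int.mod (m - center - 1) 4 ≤ PySem.Int.mod (y - center - 1) 4 := by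
        intro y hy hy0 hy3
        exact PySem.List.min?_isMin hmq y
          (List.mem_filter.mpr ⟨hy, by simp [hy0, hy3]⟩)
      rw [loopA_min center cs m hmcs hmr.1 hmr.2 hmin]
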